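-- pv_equiv track=rewrite | github.com/QingJiuYS/Syntax_extraction | main_parsing.py | correct_if_type
-- ===== SOURCE A (Python) =====
-- def correct_if_type(packet):
--     valid = True
--     dependence_info = {}
--     for field in packet:
--         if 'if_dependence' in field:
--             for dependence in field['if_dependence']:
--                 condition = dependence[0]
--                 condition_value = dependence[1]
--                 if condition in dependence_info.keys():
--                     if (condition_value !=  dependence_info[condition]):
--                         valid = False
--                 else:
--                     dependence_info[condition] = condition_value
--     return valid
-- ===== SOURCE B (Python) =====
-- def correct_if_type(packet):
--     groups = {}
--     for field in packet:
--         if 'if_dependence' in field: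
--             for dependence in field['if_dependence']:
--                 groups.setdefault(dependence[0], []).append(dependence[1])
--     return all(all(v == vals[0] for v in vals) for vals in groups.values())
-- ===== Notes on version B (the rewrite author's own statement) =====
-- stated objective: alternative
-- what changed: Replaces A's interleaved single pass (first-seen dict plus a running valid flag checked against every later occurrence) with a group-then-verify decomposition: one pass groups all observed values per condition into lists, a second, separate pass checks each group is constant (every value equals the group's first).
import Mathlib
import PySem

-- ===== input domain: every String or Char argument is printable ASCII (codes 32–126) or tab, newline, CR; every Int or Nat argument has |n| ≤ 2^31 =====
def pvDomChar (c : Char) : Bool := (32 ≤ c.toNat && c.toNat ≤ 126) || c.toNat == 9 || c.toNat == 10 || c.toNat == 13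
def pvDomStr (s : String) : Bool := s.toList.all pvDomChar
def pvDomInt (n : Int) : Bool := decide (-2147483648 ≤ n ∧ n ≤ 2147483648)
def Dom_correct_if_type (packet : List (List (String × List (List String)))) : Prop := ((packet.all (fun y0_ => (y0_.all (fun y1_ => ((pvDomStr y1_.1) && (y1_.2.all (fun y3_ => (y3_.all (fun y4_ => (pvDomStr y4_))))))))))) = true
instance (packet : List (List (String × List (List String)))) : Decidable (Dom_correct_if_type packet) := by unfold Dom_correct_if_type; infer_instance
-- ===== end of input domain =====

-- B replaces A's interleaved first-seen-vs-rest check with a group-then-verify decomposition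
-- (one pass collects all values per condition, a second pass checks each group is constant);
-- same cost, different structure (objective: alternative).


-- ===== PORT A =====
-- one dependence step of A's inner loop: compare against the first-seen value, or record it
def pvAStep (st : Bool × PySem.Dict String String) (dep : List String) :
    Bool × PySem.Dict String String :=
  let condition := (PySem.List.pyGet? dep 0).getD ""
  let condition_value := (PySem.List.pyGet? dep 1).getD ""
  if st.2.contains condition then
    if condition_value == st.2.getD condition "" then st else (false, st.2)
  else
    (st.1, st.2.insert condition condition_value)

def correct_if_type (packet : List (List (String × List (List String)))) : Bool :=
  (packet.foldl
    (fun st field =>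
      let fd := PySem.Dict.mk field
      if fd.contains "if_dependence" then
        (fd.getD "if_dependence" []).foldl pvAStep st
      else st)
    (true, PySem.Dict.empty)).1

-- ===== PORT B =====
-- one dependence step of B's grouping pass: groups.setdefault(dep[0], []).append(dep[1])
def pvBStep (g : PySem.Dict String (List String)) (dep : List String) :
    PySem.Dict String (List String) :=
  g.modify ((PySem.List.pyGet? dep 0).getD "") [] (· ++ [(PySem.List.pyGet? dep 1).getD ""])

-- all(v == vals[0] for v in vals)
def pvCheckGroup (vals : List String) : Bool :=
  match vals with
  | [] => true
  | v0 :: _ => vals.all (· == v0)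

def correct_if_type_alt (packet : List (List (String × List (List String)))) : Bool :=
  let groups :=
    packet.foldl
      (fun g field =>
        let fd := PySem.Dict.mk field
        if fd.contains "if_dependence" then
          (fd.getD "if_dependence" []).foldl pvBStep g
        else g)
      PySem.Dict.empty
  groups.values.all pvCheckGroup

-- ===== PRECONDITION & SPEC =====
-- Pre_ excludes exactly the inputs where A raises IndexError: a dependence entry
-- of the used 'if_dependence' list with fewer than 2 elements.
def Pre_correct_if_type (packet : List (List (String × List (List String)))) : Prop :=
  ∀ field ∈ packet, ∀ dep ∈ (PySem.Dict.mk field).getD "if_dependence" [], 2 ≤ dep.length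
instance (packet : List (List (String × List (List String)))) : Decidable (Pre_correct_if_type packet) := by unfold Pre_correct_if_type; infer_instance

def pvWitness_correct_if_type : (List (List (String × List (List String)))) :=
  [[("if_dependence", [["a", "x"], ["a", "x"]])], [("other", [])]]

def Spec_correct_if_type (packet : List (List (String × List (List String)))) (out : Bool) : Prop := out = correct_if_type_alt packet
instance (packet : List (List (String × List (List String)))) (out : Bool) : Decidable (Spec_correct_if_type packet out) := by unfold Spec_correct_if_type; infer_instance

-- ===== CLAIM (what is proved, stated in full; the proofs are below) =====
def Claim_equal_correct_if_type : Prop := ∀ (packet : List (List (String × List (List String)))), Dom_correct_if_type packet → Pre_correct_if_type packet → Spec_correct_if_type packet (correct_if_type packet)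

-- ===== LEMMAS AND PROOFS =====

-- the (condition, value) pair a dependence entry yields
def pvPair (dep : List String) : String × String :=
  ((PySem.List.pyGet? dep 0).getD "", (PySem.List.pyGet? dep 1).getD "")

-- the flattened stream of (condition, value) pairs both programs traverse
def pvPairs (packet : List (List (String × List (List String)))) : List (String × String) :=
  packet.flatMap (fun field =>
    let fd := PySem.Dict.mk field
    if fd.contains "if_dependence" then
      (fd.getD "if_dependence" []).map pvPair
    else [])

-- A's step on an already-extracted pair
def pvAStepP (st : Bool × PySem.Dict String String) (p : String × String) :
    Bool × PySem.Dict String String :=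
  if st.2.contains p.1 then
    if p.2 == st.2.getD p.1 "" then st else (false, st.2)
  else
    (st.1, st.2.insert p.1 p.2)

-- first value recorded for condition c in the pair stream l
def pvFirst (l : List (String × String)) (c : String) : String :=
  ((l.filter (fun p => p.1 == c)).map (·.2)).headD ""

theorem flatten_A (packet : List (List (String × List (List String))))
    (st : Bool × PySem.Dict String String) :
    packet.foldl
      (fun st field =>
        let fd := PySem.Dict.mk field
        if fd.contains "if_dependence" then
          (fd.getD "if_dependence" []).foldl pvAStep st
        else st) st
    = (pvPairs packet).foldl pvAStepP st := by
  induction packet generalizing st with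
  | nil => rfl
  | cons f t ih =>
    simp only [List.foldl_cons, pvPairs, List.flatMap_cons, List.foldl_append]
    rw [ih]
    by_cases h : (PySem.Dict.mk f).contains "if_dependence"
    · simp only [h, if_true, List.foldl_map]
      rfl
    · simp [pvPairs, h]

theorem flatten_B (packet : List (List (String × List (List String))))
    (g : PySem.Dict String (List String)) :
    packet.foldl
      (fun g field =>
        let fd := PySem.Dict.mk field
        if fd.contains "if_dependence" then
          (fd.getD "if_dependence" []).foldl pvBStep g
        else g) g
    = (pvPairs packet).foldl (fun d p => d.modify p.1 [] (· ++ [p.2])) g := by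
  induction packet generalizing g with
  | nil => rfl
  | cons f t ih =>
    simp only [List.foldl_cons, pvPairs, List.flatMap_cons, List.foldl_append]
    rw [ih]
    by_cases h : (PySem.Dict.mk f).contains "if_dependence"
    · simp only [h, if_true, List.foldl_map]
      rfl
    · simp [pvPairs, h]

-- A's loop as a structural recursion on the pair stream (valid factored out)
def pvCons (d : PySem.Dict String String) : List (String × String) → Bool
  | [] => true
  | p :: t =>
    if d.contains p.1 then (p.2 == d.getD p.1 "") && pvCons d t
    else pvCons (d.insert p.1 p.2) t

theorem aLoop_fst (l : List (String × String)) (valid : Bool)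
    (d : PySem.Dict String String) :
    (l.foldl pvAStepP (valid, d)).1 = (valid && pvCons d l) := by
  induction l generalizing valid d with
  | nil => simp [pvCons]
  | cons p t ih =>
    simp only [List.foldl_cons, pvAStepP, pvCons]
    by_cases h : d.contains p.1
    · simp only [h, if_true]
      by_cases h2 : p.2 == d.getD p.1 ""
      · simp [h2, ih]
      · simp [h2, ih]
    · simp [h, ih]

theorem pvCons_char (l : List (String × String)) (d : PySem.Dict String String) :
    pvCons d l
      = l.all (fun p => p.2 == (if d.contains p.1 then d.getD p.1 "" else pvFirst l p.1)) := by
  induction l generalizing d with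
  | nil => rfl
  | cons q t ih =>
    by_cases h : d.contains q.1
    · simp only [pvCons, h, if_true, List.all_cons, ih]
      congr 1
      refine List.all_congr rfl (fun p => ?_)
      by_cases hc : d.contains p.1
      · simp [hc]
      · have hne : (q.1 == p.1) = false := by
          by_contra hqq
          simp only [Bool.not_eq_false, beq_iff_eq] at hqq
          rw [← hqq] at hc; exact hc h
        have hf : pvFirst (q :: t) p.1 = pvFirst t p.1 := by
          simp [pvFirst, hne]
        simp [hc, hf]
    · have h' : d.contains q.1 = false := by simpa using h
      have hfq : pvFirst (q :: t) q.1 = q.2 := by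
        simp [pvFirst]
      simp only [pvCons, List.all_cons, ih, hfq, h', Bool.false_eq_true, if_false,
        beq_self_eq_true, Bool.true_and]
      refine List.all_congr rfl (fun p => ?_)
      by_cases he : p.1 = q.1
      · simp [he, h', hfq]
      · have hne : (q.1 == p.1) = false := by simp [Ne.symm he]
        have hf : pvFirst (q :: t) p.1 = pvFirst t p.1 := by
          simp [pvFirst, hne]
        simp [PySem.Dict.contains_insert, PySem.Dict.getD_insert, he, hf]

theorem pvMain (l : List (String × String)) :
    l.all (fun p => p.2 == pvFirst l p.1)
      = (PySem.Set.ofList (l.map (·.1))).all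
          (fun k => pvCheckGroup ((l.filter (fun p => p.1 == k)).map (·.2))) := by
  rw [Bool.eq_iff_iff]
  simp only [List.all_eq_true, PySem.Set.mem_ofList, List.mem_map, beq_iff_eq]
  constructor
  · rintro H k ⟨p0, hp0, rfl⟩
    cases hm : (l.filter (fun p => p.1 == p0.1)).map (·.2) with
    | nil => simp [pvCheckGroup]
    | cons v0 vs' =>
      have hv0 : v0 = pvFirst l p0.1 := by simp [pvFirst, hm]
      simp only [pvCheckGroup, List.all_eq_true, beq_iff_eq]
      intro v hv
      rw [← hm] at hv
      obtain ⟨p, hpmem, rfl⟩ := List.mem_map.mp hv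
      have hmf := List.mem_filter.mp hpmem
      have hk : p.1 = p0.1 := by simpa using hmf.2
      rw [hv0, ← hk]
      exact H p hmf.1
  · intro H p hp
    have hk := H p.1 ⟨p, hp, rfl⟩
    have hpf : p ∈ l.filter (fun q => q.1 == p.1) := List.mem_filter.mpr ⟨hp, by simp⟩
    have hpm : p.2 ∈ (l.filter (fun q => q.1 == p.1)).map (·.2) := List.mem_map.mpr ⟨p, hpf, rfl⟩
    cases hm : (l.filter (fun q => q.1 == p.1)).map (·.2) with
    | nil => rw [hm] at hpm; simp at hpm
    | cons v0 vs' =>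
      rw [hm] at hpm hk
      simp only [pvCheckGroup, List.all_eq_true, beq_iff_eq] at hk
      have hv0 : pvFirst l p.1 = v0 := by simp [pvFirst, hm]
      rw [hv0]
      exact hk p.2 hpm

-- ===== VERDICT (by name: the statement is the Claim_ definition above) =====
theorem correct_if_type_spec : Claim_equal_correct_if_type := by
  intro packet _ _
  unfold Spec_correct_if_type correct_if_type correct_if_type_alt
  rw [flatten_A, flatten_B]
  set l := pvPairs packet
  rw [aLoop_fst, Bool.true_and, pvCons_char]
  have hnd : (l.foldl (fun d p => d.modify p.1 [] (· ++ [p.2])) PySem.Dict.empty).keys.Nodup :=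
    PySem.Dict.nodup_keys_foldl_modify_key l Prod.fst [] _ PySem.Dict.empty (by simp)
  show _ = ((l.foldl (fun d p => d.modify p.1 [] (· ++ [p.2])) PySem.Dict.empty).values.all pvCheckGroup)
  rw [PySem.Dict.values_eq_map_keys _ hnd []]
  rw [PySem.Dict.keys_foldl_modify_key]
  simp only [PySem.Dict.keys_empty, List.all_map]
  have hgd : ∀ k, (l.foldl (fun d p => d.modify p.1 [] (· ++ [p.2])) PySem.Dict.empty).getD k []
      = (l.filter (fun p => p.1 == k)).map (·.2) := by
    intro k
    rw [PySem.Dict.getD_foldl_modify_append]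
    simp [PySem.Dict.getD_empty]
  simp only [PySem.Dict.contains_empty, Bool.false_eq_true, if_false]
  simp only [Function.comp_def, hgd]
  exact pvMain l
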